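-- pv_equiv track=rewrite | github.com/sandyluiza/ProjetosPython | teste41000.py | ultima_parada
-- ===== SOURCE A (Python) =====
-- def ultima_parada(combustivel, consumo, postos_de_gasolina):
--     distancia = combustivel * consumo
--     postos_de_gasolina = sorted(postos_de_gasolina)
--     i = 0
--
--     if distancia < postos_de_gasolina[0]:
--         b = -1
--         return b
--     else:
--         while ((distancia >= postos_de_gasolina[i]) and (i < len(postos_de_gasolina))):
--             if i == (len(postos_de_gasolina) - 1):
--                 return postos_de_gasolina[i]
--             i = i + 1
--         return postos_de_gasolina[i - 1]
-- ===== SOURCE B (Python) =====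
-- def ultima_parada(combustivel, consumo, postos_de_gasolina):
--     distancia = combustivel * consumo
--     alcancaveis = [p for p in postos_de_gasolina if p <= distancia]
--     return max(alcancaveis) if alcancaveis else -1
-- ===== Notes on version B (the rewrite author's own statement) =====
-- stated objective: faster
-- what changed: B drops the sort and the index-based while-scan entirely: it filters the stations reachable within distancia in one pass and returns their maximum (or -1 if none), instead of sorting and walking the sorted array with a cursor.
import Mathlib
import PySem

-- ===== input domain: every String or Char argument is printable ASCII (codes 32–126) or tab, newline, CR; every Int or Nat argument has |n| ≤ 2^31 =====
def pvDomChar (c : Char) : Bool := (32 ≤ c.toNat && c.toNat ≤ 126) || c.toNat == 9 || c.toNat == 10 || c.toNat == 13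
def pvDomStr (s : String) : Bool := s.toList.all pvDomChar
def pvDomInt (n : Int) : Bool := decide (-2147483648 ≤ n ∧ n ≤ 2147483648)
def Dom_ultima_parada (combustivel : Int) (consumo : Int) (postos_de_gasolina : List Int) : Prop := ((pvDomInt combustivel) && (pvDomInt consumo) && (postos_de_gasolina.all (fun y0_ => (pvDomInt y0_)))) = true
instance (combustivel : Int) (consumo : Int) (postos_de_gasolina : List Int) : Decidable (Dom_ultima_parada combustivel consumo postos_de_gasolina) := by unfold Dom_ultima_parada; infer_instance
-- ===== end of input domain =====

-- B replaces A's sort + index-walking while-loop by a single filter of the reachable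
-- stations followed by max (with -1 when none is reachable): no sort, O(n) instead of O(n log n).

-- ===== PORT A =====
-- the while-loop of A: state is the index i; fuel bounds the iteration count
def pvLoopA (d : Int) (s : List Int) : Nat → Nat → Int
  | 0, _ => 0
  | fuel+1, i =>
    if d ≥ PySem.List.pyGetD s (i : Int) 0 ∧ i < s.length then
      if i = s.length - 1 then PySem.List.pyGetD s (i : Int) 0
      else pvLoopA d s fuel (i+1)
    else PySem.List.pyGetD s ((i : Int) - 1) 0

def ultima_parada (combustivel : Int) (consumo : Int) (postos_de_gasolina : List Int) : Int :=
  let distancia := combustivel * consumo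
  let postos := PySem.List.sorted postos_de_gasolina (fun x => x) false
  if distancia < PySem.List.pyGetD postos 0 0 then -1
  else pvLoopA distancia postos postos.length 0

-- ===== PORT B =====
def ultima_parada_alt (combustivel : Int) (consumo : Int) (postos_de_gasolina : List Int) : Int :=
  let distancia := combustivel * consumo
  let alcancaveis := postos_de_gasolina.filter (fun p => decide (p ≤ distancia))
  match PySem.List.max? alcancaveis (fun x => x) with
  | some m => m
  | none => -1

-- ===== PRECONDITION & SPEC =====
-- A indexes postos_de_gasolina[0]: on the empty list it raises IndexError, so Pre_ excludes [].
def Pre_ultima_parada (combustivel : Int) (consumo : Int) (postos_de_gasolina : List Int) : Prop :=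
  postos_de_gasolina ≠ []
instance (combustivel : Int) (consumo : Int) (postos_de_gasolina : List Int) : Decidable (Pre_ultima_parada combustivel consumo postos_de_gasolina) := by unfold Pre_ultima_parada; infer_instance
def pvWitness_ultima_parada : Int × Int × List Int := (3, 2, [4, 9, 1])

def Spec_ultima_parada (combustivel : Int) (consumo : Int) (postos_de_gasolina : List Int) (out : Int) : Prop := out = ultima_parada_alt combustivel consumo postos_de_gasolina
instance (combustivel : Int) (consumo : Int) (postos_de_gasolina : List Int) (out : Int) : Decidable (Spec_ultima_parada combustivel consumo postos_de_gasolina out) := by unfold Spec_ultima_parada; infer_instance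

-- ===== CLAIM (what is proved, stated in full; the proofs are below) =====
def Claim_equal_ultima_parada : Prop := ∀ (combustivel : Int) (consumo : Int) (postos_de_gasolina : List Int), Dom_ultima_parada combustivel consumo postos_de_gasolina → Pre_ultima_parada combustivel consumo postos_de_gasolina → Spec_ultima_parada combustivel consumo postos_de_gasolina (ultima_parada combustivel consumo postos_de_gasolina)

-- ===== LEMMAS AND PROOFS =====

-- A's loop on a sorted list with s[i] ≤ d returns the maximum element of s that is ≤ d.
theorem pvLoopA_max (d : Int) (s : List Int) (hs : s.Pairwise (· ≤ ·)) :
    ∀ (fuel i : Nat) (hi : i < s.length), s[i] ≤ d → s.length - i ≤ fuel →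
      pvLoopA d s fuel i ∈ s ∧ pvLoopA d s fuel i ≤ d ∧
        ∀ y ∈ s, y ≤ d → y ≤ pvLoopA d s fuel i := by
  have hmono : ∀ (p q : Nat) (hq : q < s.length) (hpq : p ≤ q), s[p]'(Nat.lt_of_le_of_lt hpq hq) ≤ s[q] := by
    intro p q hq hpq
    rcases Nat.lt_or_ge p q with h | h
    · exact (List.pairwise_iff_getElem.mp hs) p q (by omega) hq h
    · have : p = q := by omega
      subst this; exact le_refl _
  intro fuel
  induction fuel with
  | zero => intro i hi _ hf; omega
  | succ f ih =>
    intro i hi hle hf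
    have hget : PySem.List.pyGetD s (i : Int) 0 = s[i] := by
      rw [PySem.List.pyGetD_natCast]; simp [List.getD, hi]
    rw [pvLoopA]
    rw [if_pos ⟨by rw [hget]; exact hle, hi⟩]
    by_cases hlast : i = s.length - 1
    · rw [if_pos hlast]
      refine ⟨by rw [hget]; exact List.getElem_mem _, by rw [hget]; exact hle, ?_⟩
      intro y hy _
      rw [hget]
      obtain ⟨j, hj, rfl⟩ := List.mem_iff_getElem.mp hy
      exact hmono j i hi (by omega)
    · rw [if_neg hlast]
      have hi1 : i + 1 < s.length := by omega
      by_cases hnext : s[i+1] ≤ d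
      · exact ih (i+1) hi1 hnext (by omega)
      · -- next station is beyond reach: the recursive call exits at once returning s[i]
        have hf1 : ∃ f', f = f' + 1 := ⟨f - 1, by omega⟩
        obtain ⟨f', rfl⟩ := hf1
        have hget1 : PySem.List.pyGetD s ((i+1 : Nat) : Int) 0 = s[i+1] := by
          rw [PySem.List.pyGetD_natCast]; simp [List.getD, hi1]
        rw [pvLoopA]
        rw [if_neg (by rw [hget1]; intro h; exact hnext h.1)]
        have hback : PySem.List.pyGetD s (((i+1 : Nat) : Int) - 1) 0 = s[i] := by
          have : ((i+1 : Nat) : Int) - 1 = ((i : Nat) : Int) := by push_cast; ring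
          rw [this, PySem.List.pyGetD_natCast]; simp [List.getD, hi]
        rw [hback]
        refine ⟨List.getElem_mem _, hle, ?_⟩
        intro y hy hyd
        obtain ⟨j, hj, rfl⟩ := List.mem_iff_getElem.mp hy
        rcases Nat.lt_or_ge j (i+1) with h | h
        · exact hmono j i hi (by omega)
        · exact absurd hyd (by
            have := hmono (i+1) j hj h
            intro hc; exact hnext (le_trans this hc))

theorem ultima_parada_spec : Claim_equal_ultima_parada := by
  intro c k ps _ hne
  unfold Spec_ultima_parada ultima_parada ultima_parada_alt
  dsimp only
  set d := c * k with hd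
  set s := PySem.List.sorted ps (fun x => x) false with hsdef
  have hsperm : s.Perm ps := PySem.List.sorted_perm ps (fun x => x) false
  have hsne : s ≠ [] := by
    intro h; exact hne ((h ▸ hsperm).symm.eq_nil)
  obtain ⟨m, t, hcons⟩ := List.exists_cons_of_ne_nil hsne
  have hhead : PySem.List.pyGetD s 0 0 = m := by
    rw [hcons, PySem.List.pyGetD_zero_cons]
  have hmin : ∀ y ∈ ps, m ≤ y := by
    intro y hy
    exact PySem.List.key_head_sorted_le (xs := ps) (key := fun x => x) hcons y hy
  have hpair : s.Pairwise (· ≤ ·) := PySem.List.sorted_pairwise ps (fun x => x)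
  by_cases hlt : d < PySem.List.pyGetD s 0 0
  · rw [if_pos hlt]
    -- every station exceeds d, so the filter is empty and B returns -1
    have hfilt : ps.filter (fun p => decide (p ≤ d)) = [] := by
      rw [List.filter_eq_nil_iff]
      intro p hp hple
      have : m ≤ p := hmin p hp
      rw [hhead] at hlt
      simp at hple; omega
    rw [hfilt]; rfl
  · rw [if_neg hlt]
    rw [hhead] at hlt
    rw [not_lt] at hlt
    have hm_mem : m ∈ ps := by
      have hm_s : m ∈ s := by rw [hcons]; exact List.mem_cons_self
      rw [hsdef] at hm_s
      exact (PySem.List.mem_sorted ps (fun x => x) false m).mp hm_s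
    -- the filter is nonempty: m is in it
    have hm_filt : m ∈ ps.filter (fun p => decide (p ≤ d)) := by
      rw [List.mem_filter]; exact ⟨hm_mem, by simpa using hlt⟩
    have hfne : ps.filter (fun p => decide (p ≤ d)) ≠ [] := by
      intro h; rw [h] at hm_filt; exact List.not_mem_nil hm_filt
    obtain ⟨mx, hmx⟩ := Option.ne_none_iff_exists'.mp
      (by rw [Ne, PySem.List.max?_eq_none_iff]; exact hfne :
        PySem.List.max? (ps.filter (fun p => decide (p ≤ d))) (fun x => x) ≠ none)
    rw [hmx]
    have hmx_mem := PySem.List.max?_mem hmx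
    have hmx_max := PySem.List.max?_isMax hmx
    rw [List.mem_filter] at hmx_mem
    have hmx_ps : mx ∈ ps := hmx_mem.1
    have hmx_le : mx ≤ d := by simpa using hmx_mem.2
    have h0 : (0 : Nat) < s.length := by rw [hcons]; simp
    have hs0 : s[0]'h0 ≤ d := by
      have hm : s[0]'h0 = m := by simp only [hcons, List.getElem_cons_zero]
      rw [hm]; exact hlt
    obtain ⟨hAmem, hAle, hAmax⟩ := pvLoopA_max d s hpair s.length 0 h0 hs0 (by omega)
    -- both are the maximum of the reachable stations: equal by antisymmetry
    have h1 : pvLoopA d s s.length 0 ≤ mx := by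
      apply hmx_max
      rw [List.mem_filter]
      exact ⟨(PySem.List.mem_sorted _ _ _ _).mp hAmem, by simpa using hAle⟩
    have h2 : mx ≤ pvLoopA d s s.length 0 :=
      hAmax mx ((PySem.List.mem_sorted _ _ _ _).mpr hmx_ps) hmx_le
    show pvLoopA d s s.length 0 = mx
    omega
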